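-- pv_equiv track=rewrite | github.com/margaretmfleck/repetition | find-repeats-v4.py | merge_repeats
-- ===== SOURCE A (Python) =====
-- def merge_repeats(raw_repeats):
--     if len(raw_repeats) < 2:
--         return raw_repeats
--     output = []
--     new = raw_repeats[0]
--     tempstring = new[0]
--     pos = new[1]  # glued to the first position in this merged string
--     dist = new[2]
--     movingpos = pos  # moves along string as we shift forwards
--     for next in raw_repeats[1:]:
-- #        if (next[1] == movingpos+1 and next[2] == dist):
--         if (next[1] == movingpos+1):
--             # this tuple continues previous one
--             tempstring = tempstring+next[0][-1]   # merge the strings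
--             movingpos += 1
--         else:
--             output.append([tempstring,pos, dist])  # put merged tuple onto output
--             tempstring = next[0]
--             pos = next[1]
--             dist = next[2]
--             movingpos = pos
--     output.append([tempstring,pos, dist])  # put final merged tuple onto output
--     return output
-- ===== SOURCE B (Python) =====
-- def merge_repeats(raw_repeats):
--     if len(raw_repeats) < 2:
--         return raw_repeats
--     # phase 1: group into runs (head, tail) by comparing adjacent positions
--     runs = []
--     head, tail = raw_repeats[0], []
--     for prev, cur in zip(raw_repeats, raw_repeats[1:]):
--         if cur[1] == prev[1] + 1:
--             tail.append(cur)
--         else: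
--             runs.append((head, tail))
--             head, tail = cur, []
--     runs.append((head, tail))
--     # phase 2: build one merged tuple per run
--     return [[h[0] + ''.join(t[0][-1] for t in tl), h[1], h[2]] for h, tl in runs]
-- ===== Notes on version B (the rewrite author's own statement) =====
-- stated objective: alternative
-- what changed: Replaces A's single pass threading tempstring/pos/dist/movingpos state with a two-phase decomposition: first cut the list into runs by comparing adjacent positions (zip of the list with its tail), then map each run (head, tail) to [head string + joined last chars of the tail, head pos, head dist].
import Mathlib
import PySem

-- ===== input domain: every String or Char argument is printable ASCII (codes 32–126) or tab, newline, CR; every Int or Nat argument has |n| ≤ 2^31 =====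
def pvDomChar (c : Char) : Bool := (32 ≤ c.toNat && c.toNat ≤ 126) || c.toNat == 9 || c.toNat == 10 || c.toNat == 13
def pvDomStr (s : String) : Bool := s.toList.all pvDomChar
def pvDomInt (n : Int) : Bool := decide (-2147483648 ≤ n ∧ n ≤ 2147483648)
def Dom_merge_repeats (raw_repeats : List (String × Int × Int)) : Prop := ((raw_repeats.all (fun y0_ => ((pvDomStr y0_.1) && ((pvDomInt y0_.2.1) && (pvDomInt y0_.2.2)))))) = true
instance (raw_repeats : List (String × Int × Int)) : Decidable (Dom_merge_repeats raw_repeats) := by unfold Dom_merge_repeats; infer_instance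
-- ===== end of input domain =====

-- B replaces A's inline tempstring/movingpos accumulation by a grouping phase (adjacent-position
-- zip cutting the list into runs) followed by a construction phase (join of last chars per run);
-- objective: alternative decomposition, same cost.


-- ===== PORT A =====

-- port of s[-1]; exact when s ≠ "" (Pre_ guarantees every indexed string is nonempty)
def pvLastA (s : String) : Char := (PySem.Str.pyGet? s (-1)).getD ' '

-- the body of A's for-loop, on state (output, tempstring, pos, dist, movingpos)
def pvStepA (st : List (String × Int × Int) × String × Int × Int × Int)
    (next : String × Int × Int) : List (String × Int × Int) × String × Int × Int × Int :=
  let (output, tempstring, pos, dist, movingpos) := st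
  if next.2.1 = movingpos + 1 then
    (output, tempstring ++ String.ofList [pvLastA next.1], pos, dist, movingpos + 1)
  else
    (output ++ [(tempstring, pos, dist)], next.1, next.2.1, next.2.2, next.2.1)

def merge_repeats (raw_repeats : List (String × Int × Int)) : List (String × Int × Int) :=
  match raw_repeats with
  | [] => raw_repeats
  | [_] => raw_repeats
  | new :: rest =>
    let st := rest.foldl pvStepA ([], new.1, new.2.1, new.2.2, new.2.1)
    st.1 ++ [(st.2.1, st.2.2.1, st.2.2.2.1)]

-- ===== PORT B =====

-- port of s[-1] on B's side; exact when s ≠ "" (Pre_ guarantees every indexed string is nonempty)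
def pvLastB (s : String) : Char := (PySem.Str.pyGet? s (-1)).getD ' '

-- port of ''.join(t[0][-1] for t in tl)
def pvJoinLast (tl : List (String × Int × Int)) : String :=
  PySem.Str.join "" (tl.map (fun t => String.ofList [pvLastB t.1]))

-- phase 2: one merged tuple per run (head, tail)
def pvRunOut (r : (String × Int × Int) × List (String × Int × Int)) : String × Int × Int :=
  (r.1.1 ++ pvJoinLast r.2, r.1.2.1, r.1.2.2)

-- the body of B's grouping loop, on state (runs, head, tail); pc = (prev, cur)
def pvStepB (st : List ((String × Int × Int) × List (String × Int × Int)) × (String × Int × Int) × List (String × Int × Int))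
    (pc : (String × Int × Int) × (String × Int × Int)) :
    List ((String × Int × Int) × List (String × Int × Int)) × (String × Int × Int) × List (String × Int × Int) :=
  let (runs, head, tail) := st
  if pc.2.2.1 = pc.1.2.1 + 1 then (runs, head, tail ++ [pc.2])
  else (runs ++ [(head, tail)], pc.2, [])

def merge_repeats_alt (raw_repeats : List (String × Int × Int)) : List (String × Int × Int) :=
  if raw_repeats.length < 2 then raw_repeats
  else
    let st := (raw_repeats.zip raw_repeats.tail).foldl pvStepB ([], raw_repeats.headD ("", 0, 0), [])
    (st.1 ++ [(st.2.1, st.2.2)]).map pvRunOut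

-- ===== PRECONDITION & SPEC =====
-- Pre_ excludes exactly the inputs where both Pythons raise IndexError: a tuple whose position
-- continues its predecessor's (cur[1] == prev[1] + 1) but whose string is empty, so t[0][-1] fails.
def Pre_merge_repeats (raw_repeats : List (String × Int × Int)) : Prop :=
  ∀ pc ∈ raw_repeats.zip raw_repeats.tail, pc.2.2.1 = pc.1.2.1 + 1 → pc.2.1 ≠ ""
instance (raw_repeats : List (String × Int × Int)) : Decidable (Pre_merge_repeats raw_repeats) := by
  unfold Pre_merge_repeats; infer_instance
def pvWitness_merge_repeats : (List (String × Int × Int)) := [("ab", 3, 1), ("bc", 4, 1), ("zz", 9, 2)]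

def Spec_merge_repeats (raw_repeats : List (String × Int × Int)) (out : List (String × Int × Int)) : Prop := out = merge_repeats_alt raw_repeats
instance (raw_repeats : List (String × Int × Int)) (out : List (String × Int × Int)) : Decidable (Spec_merge_repeats raw_repeats out) := by unfold Spec_merge_repeats; infer_instance

-- ===== CLAIM (what is proved, stated in full; the proofs are below) =====
def Claim_equal_merge_repeats : Prop := ∀ (raw_repeats : List (String × Int × Int)), Dom_merge_repeats raw_repeats → Pre_merge_repeats raw_repeats → Spec_merge_repeats raw_repeats (merge_repeats raw_repeats)

-- ===== LEMMAS AND PROOFS =====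

lemma pvLastA_eq_pvLastB (s : String) : pvLastA s = pvLastB s := rfl

lemma pvJoinLast_nil : pvJoinLast [] = "" := rfl

lemma pvIntercalate_nil (l : List (List Char)) : List.intercalate [] l = l.flatten := by
  induction l with
  | nil => rfl
  | cons h t ih => cases t <;> simp_all [List.intercalate, List.intersperse]

lemma pvJoinLast_append_singleton (tl : List (String × Int × Int)) (c : String × Int × Int) :
    pvJoinLast (tl ++ [c]) = pvJoinLast tl ++ String.ofList [pvLastB c.1] := by
  apply String.toList_injective
  simp [pvJoinLast, PySem.Str.join, PySem.Chars.join, pvIntercalate_nil]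

-- one simultaneous induction relating A's fold to B's fold over the zip of adjacent pairs;
-- the invariant: A's movingpos is the previous element's position and A's tempstring is the
-- current run's head string with the last chars of the run's tail already appended.
lemma pvLoop_eq (rest : List (String × Int × Int)) :
    ∀ (prev : String × Int × Int) (runs : List ((String × Int × Int) × List (String × Int × Int)))
      (head : String × Int × Int) (tail : List (String × Int × Int)),
    (let st := rest.foldl pvStepA
        (runs.map pvRunOut, head.1 ++ pvJoinLast tail, head.2.1, head.2.2, prev.2.1)
     st.1 ++ [(st.2.1, st.2.2.1, st.2.2.2.1)])
    = (let st := ((prev :: rest).zip rest).foldl pvStepB (runs, head, tail)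
       (st.1 ++ [(st.2.1, st.2.2)]).map pvRunOut) := by
  induction rest with
  | nil =>
    intro prev runs head tail
    simp [List.foldl, pvRunOut]
  | cons c rest' ih =>
    intro prev runs head tail
    simp only [List.zip_cons_cons, List.foldl_cons]
    by_cases h : c.2.1 = prev.2.1 + 1
    · have hA : pvStepA (runs.map pvRunOut, head.1 ++ pvJoinLast tail, head.2.1, head.2.2, prev.2.1) c
          = (runs.map pvRunOut, head.1 ++ pvJoinLast (tail ++ [c]), head.2.1, head.2.2, c.2.1) := by
        simp [pvStepA, h, pvJoinLast_append_singleton, String.append_assoc, pvLastA_eq_pvLastB]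
      have hB : pvStepB (runs, head, tail) (prev, c) = (runs, head, tail ++ [c]) := by
        simp [pvStepB, h]
      rw [hA, hB]
      exact ih c runs head (tail ++ [c])
    · have hA : pvStepA (runs.map pvRunOut, head.1 ++ pvJoinLast tail, head.2.1, head.2.2, prev.2.1) c
          = ((runs ++ [(head, tail)]).map pvRunOut, c.1, c.2.1, c.2.2, c.2.1) := by
        simp [pvStepA, h, pvRunOut]
      have hB : pvStepB (runs, head, tail) (prev, c) = (runs ++ [(head, tail)], c, []) := by
        simp [pvStepB, h]
      rw [hA, hB]
      have := ih c (runs ++ [(head, tail)]) c []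
      simpa [pvJoinLast_nil] using this

-- ===== VERDICT (by name: the statement is the Claim_ definition above) =====
theorem merge_repeats_spec : Claim_equal_merge_repeats := by
  intro raw _ _
  unfold Spec_merge_repeats
  match raw with
  | [] => rfl
  | [_] => rfl
  | x :: c :: rest =>
    have h := pvLoop_eq (c :: rest) x [] x []
    simp only [pvJoinLast_nil, String.append_empty, List.map_nil] at h
    simp only [merge_repeats]
    unfold merge_repeats_alt
    rw [if_neg (by simp)]
    exact h
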